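-- pv_equiv track=rewrite | github.com/themangokid/gen_dev_slides | slides.py | create_slides
-- ===== SOURCE A (Python) =====
-- def split_from_num(string, num):
--     return string[num:]
--
-- def create_slides(sentences, header_level=1):
--     # create a slide for each sentence
--     slides = []
--     slide = ""
--     count = 0
--     cut_off_num = 20
--     for sentence in sentences:
--         if len(sentences) < cut_off_num:
--             split_from_num(sentences, cut_off_num)
--         if count % 5 == 0 and count != 0:
--             slide += "\n---\n"
--         header = header_level * "+" + " " + sentence + "\n"
--         slide += header
--         count += 1
--         if count % 5 == 0 or count == len(sentences):
--             slides.append(slide)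
--             slide = ""
--     return slides
-- ===== SOURCE B (Python) =====
-- def create_slides(sentences, header_level=1):
--     prefix = header_level * "+" + " "
--     slides = []
--     for start in range(0, len(sentences), 5):
--         body = "".join(prefix + s + "\n" for s in sentences[start:start+5])
--         slides.append(body if start == 0 else "\n---\n" + body)
--     return slides
-- ===== Notes on version B (the rewrite author's own statement) =====
-- stated objective: alternative
-- what changed: B formats by striding over chunk start indices (range(0, n, 5)) and slicing each five-sentence window into a slide, instead of A's element-wise state machine with a running count, modulo separator tests and string accumulation; the dead split_from_num call is dropped.
import Mathlib
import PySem

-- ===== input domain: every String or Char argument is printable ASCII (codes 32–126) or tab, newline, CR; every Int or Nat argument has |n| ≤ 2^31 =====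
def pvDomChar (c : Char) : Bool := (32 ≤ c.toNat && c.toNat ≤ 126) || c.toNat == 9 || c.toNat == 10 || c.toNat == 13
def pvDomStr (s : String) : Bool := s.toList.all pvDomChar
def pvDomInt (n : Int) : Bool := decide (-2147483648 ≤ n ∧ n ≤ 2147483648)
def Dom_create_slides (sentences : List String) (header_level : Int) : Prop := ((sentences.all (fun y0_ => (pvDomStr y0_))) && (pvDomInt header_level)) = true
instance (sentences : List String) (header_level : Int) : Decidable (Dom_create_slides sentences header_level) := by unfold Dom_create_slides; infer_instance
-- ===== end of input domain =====

-- B strides over chunk start indices (range(0, n, 5)) and slices each five-sentence window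
-- into a slide, instead of A's element-wise running count / modulo-separator state machine;
-- the dead split_from_num call is dropped. Return value only; neither mutates its arguments.

-- ===== PORT A =====
def split_from_num (string : List String) (num : Int) : List String :=
  PySem.List.slice string (some num) none

-- loop body of A (sentences is the whole list, for `len(sentences)`; state = (slides, slide, count))
def stepA (sentences : List String) (header_level : Int)
    (st : List String × String × Int) (sentence : String) : List String × String × Int :=
  let _ := if sentences.length < 20 then split_from_num sentences 20 else sentences
  let slide := if PySem.Int.mod st.2.2 5 == 0 && st.2.2 != 0 then st.2.1 ++ "\n---\n" else st.2.1
  let header := String.ofList (PySem.List.pyRepeat ['+'] header_level) ++ " " ++ sentence ++ "\n"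
  let slide := slide ++ header
  let count := st.2.2 + 1
  if PySem.Int.mod count 5 == 0 || count == (sentences.length : Int) then (st.1 ++ [slide], "", count)
  else (st.1, slide, count)

def create_slides (sentences : List String) (header_level : Int) : List String :=
  (sentences.foldl (stepA sentences header_level) ([], "", 0)).1

-- ===== PORT B =====
-- for start in range(0, len(sentences), 5): slice the window, join its formatted lines, append
def stepBAlt (sentences : List String) (prefix_ : String)
    (slides : List String) (start : Int) : List String :=
  let body := PySem.Str.join ""
    ((PySem.List.slice sentences (some start) (some (start + 5))).map
      (fun s => prefix_ ++ s ++ "\n"))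
  slides ++ [if start == 0 then body else "\n---\n" ++ body]

def create_slides_alt (sentences : List String) (header_level : Int) : List String :=
  let prefix_ := String.ofList (PySem.List.pyRepeat ['+'] header_level) ++ " "
  (PySem.List.pyRange 0 (sentences.length : Int) 5).foldl (stepBAlt sentences prefix_) []

-- ===== PRECONDITION & SPEC =====
def Spec_create_slides (sentences : List String) (header_level : Int) (out : List String) : Prop := out = create_slides_alt sentences header_level
instance (sentences : List String) (header_level : Int) (out : List String) : Decidable (Spec_create_slides sentences header_level out) := by unfold Spec_create_slides; infer_instance

-- ===== CLAIM (what is proved, stated in full; the proofs are below) =====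
def Claim_equal_create_slides : Prop := ∀ (sentences : List String) (header_level : Int), Dom_create_slides sentences header_level → Spec_create_slides sentences header_level (create_slides sentences header_level)

-- ===== LEMMAS AND PROOFS =====

-- proof-side helpers: the formatted line, five-element groups, and an intermediate
-- "chunks of formatted lines" pipeline that both ports are related to
def lineF (header_level : Int) (s : String) : String :=
  String.ofList (PySem.List.pyRepeat ['+'] header_level) ++ " " ++ s ++ "\n"

def groups (l : List String) : List (List String) :=
  match l with
  | [] => []
  | x :: xs => (x :: xs).take 5 :: groups ((x :: xs).drop 5)
termination_by l.length
decreasing_by simp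

theorem groups_nil : groups [] = [] := by rw [groups.eq_def]

theorem groups_cons (x : String) (xs : List String) :
    groups (x :: xs) = (x :: xs).take 5 :: groups ((x :: xs).drop 5) := by rw [groups.eq_def]

def stepB (header_level : Int)
    (st : List (List String) × List String) (s : String) : List (List String) × List String :=
  let cur := st.2 ++ [lineF header_level s]
  if cur.length == 5 then (st.1 ++ [cur], []) else (st.1, cur)

def flushB (st : List (List String) × List String) : List (List String) :=
  if st.2 ≠ [] then st.1 ++ [st.2] else st.1

def renderChunks (chunks : List (List String)) : List String :=
  (PySem.List.enumerate chunks).map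
    (fun p => if p.1 == 0 then PySem.Str.join "" p.2 else "\n---\n" ++ PySem.Str.join "" p.2)

theorem mod_five (C m : Nat) (hm : m < 5) :
    PySem.Int.mod (5*(C:Int)+(m:Int)) 5 = (m:Int) := by
  unfold PySem.Int.mod
  rw [Int.fmod_eq_emod]
  simp
  omega

theorem chars_join_snoc (l : List (List Char)) (h : List Char) :
    PySem.Chars.join [] (l ++ [h]) = PySem.Chars.join [] l ++ h := by
  induction l with
  | nil => simp [PySem.Chars.join_nil, PySem.Chars.join_singleton]
  | cons a l ih =>
    cases l with
    | nil => simp [PySem.Chars.join_singleton, PySem.Chars.join_cons_cons]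
    | cons b l2 =>
      simp only [List.cons_append, PySem.Chars.join_cons_cons]
      simp only [List.cons_append] at ih
      rw [ih]
      simp [List.append_assoc]

theorem join_snoc (c : List String) (h : String) :
    PySem.Str.join "" (c ++ [h]) = PySem.Str.join "" c ++ h := by
  unfold PySem.Str.join
  have he : ("" : String).toList = [] := rfl
  rw [he, List.map_append, List.map_singleton, chars_join_snoc, String.ofList_append,
    String.ofList_toList]

theorem render_tail (cs : List (List String)) : ∀ (s : Int), 1 ≤ s →
    (PySem.List.enumerate cs s).map
        (fun p => if p.1 == 0 then PySem.Str.join "" p.2 else "\n---\n" ++ PySem.Str.join "" p.2)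
      = cs.map (fun c => "\n---\n" ++ PySem.Str.join "" c) := by
  induction cs with
  | nil => intro s _; simp [PySem.List.enumerate_nil]
  | cons c cs ih =>
    intro s hs
    rw [PySem.List.enumerate_cons]
    simp only [List.map_cons]
    rw [if_neg (by simp; omega), ih (s+1) (by omega)]

theorem renderChunks_cons (c : List String) (cs : List (List String)) :
    renderChunks (c :: cs)
      = PySem.Str.join "" c :: cs.map (fun c => "\n---\n" ++ PySem.Str.join "" c) := by
  unfold renderChunks
  rw [PySem.List.enumerate_cons]
  simp only [List.map_cons]
  rw [if_pos (by simp), show (0:Int)+1 = 1 from by norm_num, render_tail cs 1 (by omega)]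

theorem renderChunks_snoc (chunks : List (List String)) (c : List String) :
    renderChunks (chunks ++ [c])
      = renderChunks chunks
        ++ [(if chunks = [] then "" else "\n---\n") ++ PySem.Str.join "" c] := by
  cases chunks with
  | nil =>
      simp only [List.nil_append, renderChunks_cons, List.map_nil]
      simp [renderChunks, PySem.List.enumerate_nil]
  | cons c0 cs =>
      rw [List.cons_append, renderChunks_cons, renderChunks_cons]
      simp

theorem slideX_eq (chunks : List (List String)) (cur : List String) (slide line : String) (k : Int)
    (hk : k = 5*chunks.length + cur.length) (hm : cur.length < 5)
    (hs : slide = (if cur = [] then ""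
                   else (if chunks = [] then "" else "\n---\n") ++ PySem.Str.join "" cur)) :
    (if PySem.Int.mod k 5 == 0 && k != 0 then slide ++ "\n---\n" else slide) ++ line
      = (if chunks = [] then "" else "\n---\n") ++ PySem.Str.join "" (cur ++ [line]) := by
  have hmod : PySem.Int.mod k 5 = (cur.length : Int) := by
    rw [hk]; exact mod_five chunks.length cur.length hm
  by_cases hc : cur = []
  · subst hc
    have hs0 : slide = "" := by simpa using hs
    subst hs0
    have hJ : PySem.Str.join "" ([] ++ [line]) = line := by
      rw [List.nil_append]
      unfold PySem.Str.join
      simp [PySem.Chars.join_singleton]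
    rw [hJ]
    have hmod0 : PySem.Int.mod k 5 = 0 := by simpa using hmod
    by_cases hch : chunks = []
    · have hk0 : k = 0 := by subst hch; simpa using hk
      rw [if_pos hch, if_neg (by rw [Bool.and_eq_true, bne_iff_ne]; rintro ⟨-, h⟩; exact h hk0)]
    · have hlen1 : 1 ≤ chunks.length := List.length_pos_of_ne_nil hch
      have hnil : (List.length ([] : List String)) = 0 := rfl
      have hk0 : k ≠ 0 := by rw [hnil] at hk; omega
      rw [if_neg hch, if_pos (by rw [Bool.and_eq_true, beq_iff_eq, bne_iff_ne]; exact ⟨hmod0, hk0⟩)]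
      simp
  · have hml : cur.length ≠ 0 := by simpa [List.length_eq_zero_iff] using hc
    rw [if_neg (by rw [Bool.and_eq_true, beq_iff_eq, hmod]
                   rintro ⟨h, -⟩
                   exact hml (by exact_mod_cast h))]
    rw [hs, if_neg hc, join_snoc]
    simp [String.append_assoc]

theorem main_inv (sentences : List String) (hl : Int) :
    ∀ (rest : List String) (chunks : List (List String)) (cur : List String)
      (slides : List String) (slide : String) (k : Int),
      rest ≠ [] →
      k + rest.length = (sentences.length : Int) →
      k = 5 * chunks.length + cur.length →
      cur.length < 5 →
      slides = renderChunks chunks →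
      slide = (if cur = [] then ""
               else (if chunks = [] then "" else "\n---\n") ++ PySem.Str.join "" cur) →
      (rest.foldl (stepA sentences hl) (slides, slide, k)).1
        = renderChunks (flushB (rest.foldl (stepB hl) (chunks, cur))) := by
  intro rest
  induction rest with
  | nil => intro _ _ _ _ _ h; exact absurd rfl h
  | cons s rest ih =>
    intro chunks cur slides slide k _ hn hk hm hslides hslide
    set line := lineF hl s with hline
    have hA : stepA sentences hl (slides, slide, k) s
        = (if PySem.Int.mod (k+1) 5 == 0 || k+1 == (sentences.length : Int)
           then (slides ++ [(if PySem.Int.mod k 5 == 0 && k != 0 then slide ++ "\n---\n" else slide) ++ line], "", k+1)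
           else (slides, (if PySem.Int.mod k 5 == 0 && k != 0 then slide ++ "\n---\n" else slide) ++ line, k+1)) := by
      simp only [stepA, hline, lineF, String.append_assoc]
    have hB : stepB hl (chunks, cur) s
        = (if (cur ++ [line]).length == 5 then (chunks ++ [cur ++ [line]], ([] : List String))
           else (chunks, cur ++ [line])) := by
      simp only [stepB, hline]
    have hX := slideX_eq chunks cur slide line k hk hm hslide
    cases rest with
    | nil =>
      -- final iteration: count = k+1 = len(sentences), A appends the (possibly partial) slide
      have hlen : k + 1 = (sentences.length : Int) := by simpa using hn
      have hcondA : (PySem.Int.mod (k+1) 5 == 0 || k+1 == (sentences.length : Int)) = true := by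
        rw [Bool.or_eq_true]; right; rw [beq_iff_eq]; exact hlen
      have hAval : ([s].foldl (stepA sentences hl) (slides, slide, k)).1
          = slides ++ [(if PySem.Int.mod k 5 == 0 && k != 0 then slide ++ "\n---\n" else slide) ++ line] := by
        simp only [List.foldl_cons, List.foldl_nil, hA]
        rw [if_pos hcondA]
      have hBval : flushB ([s].foldl (stepB hl) (chunks, cur)) = chunks ++ [cur ++ [line]] := by
        simp only [List.foldl_cons, List.foldl_nil, hB]
        by_cases h5 : (cur ++ [line]).length = 5
        · rw [if_pos (by rw [beq_iff_eq]; exact h5)]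
          simp [flushB]
        · rw [if_neg (by rw [beq_iff_eq]; exact h5)]
          simp [flushB]
      rw [hAval, hBval, renderChunks_snoc, hslides, hX]
    | cons r rs =>
      -- not the last iteration: count = k+1 < len(sentences)
      have hlt : k + 1 < (sentences.length : Int) := by
        simp only [List.length_cons] at hn; push_cast at hn; omega
      by_cases h5 : (cur ++ [line]).length = 5
      · have hm4 : cur.length = 4 := by simpa using h5
        have hmod : PySem.Int.mod (k+1) 5 = 0 := by
          have he : k + 1 = 5*((chunks.length + 1 : Nat) : Int) + ((0:Nat):Int) := by
            rw [hk, hm4]; push_cast; ring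
          rw [he]
          exact mod_five (chunks.length + 1) 0 (by omega)
        have hcondA : (PySem.Int.mod (k+1) 5 == 0 || k+1 == (sentences.length : Int)) = true := by
          rw [Bool.or_eq_true]; left; rw [beq_iff_eq]; exact hmod
        have hAstep : stepA sentences hl (slides, slide, k) s
            = (slides ++ [(if chunks = [] then "" else "\n---\n") ++ PySem.Str.join "" (cur ++ [line])], "", k+1) := by
          rw [hA, if_pos hcondA, hX]
        have hBstep : stepB hl (chunks, cur) s = (chunks ++ [cur ++ [line]], ([] : List String)) := by
          rw [hB, if_pos (by rw [beq_iff_eq]; exact h5)]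
        simp only [List.foldl_cons, hAstep, hBstep]
        exact ih (chunks ++ [cur ++ [line]]) [] _ "" (k+1) (by simp)
          (by simp only [List.length_cons] at hn ⊢; push_cast at hn ⊢; omega)
          (by simp only [List.length_append, List.length_cons, List.length_nil]
              rw [hk, hm4]; push_cast; ring)
          (by simp)
          (by rw [renderChunks_snoc, hslides])
          (by simp)
      · have hmlt : cur.length + 1 < 5 := by
          have : (cur ++ [line]).length = cur.length + 1 := by simp
          omega
        have hmod : PySem.Int.mod (k+1) 5 = ((cur.length + 1 : Nat) : Int) := by
          have he : k + 1 = 5*(chunks.length:Int) + ((cur.length + 1 : Nat):Int) := by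
            rw [hk]; push_cast; ring
          rw [he]; exact mod_five chunks.length (cur.length+1) hmlt
        have hcondA : (PySem.Int.mod (k+1) 5 == 0 || k+1 == (sentences.length : Int)) = false := by
          rw [Bool.or_eq_false_iff]
          constructor
          · rw [beq_eq_false_iff_ne]; rw [hmod]
            exact_mod_cast Nat.succ_ne_zero cur.length
          · rw [beq_eq_false_iff_ne]; omega
        have hAstep : stepA sentences hl (slides, slide, k) s
            = (slides, (if chunks = [] then "" else "\n---\n") ++ PySem.Str.join "" (cur ++ [line]), k+1) := by
          rw [hA, if_neg (by rw [hcondA]; exact Bool.false_ne_true), hX]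
        have hBstep : stepB hl (chunks, cur) s = (chunks, cur ++ [line]) := by
          rw [hB, if_neg (by rw [beq_iff_eq]; exact h5)]
        simp only [List.foldl_cons, hAstep, hBstep]
        exact ih chunks (cur ++ [line]) _ _ (k+1) (by simp)
          (by simp only [List.length_cons] at hn ⊢; push_cast at hn ⊢; omega)
          (by simp only [List.length_append, List.length_cons, List.length_nil]
              rw [hk]; push_cast; ring)
          (by simpa using hmlt)
          hslides
          (by rw [if_neg (show ¬(cur ++ [line] = []) by simp)])

-- A's fold equals the renderChunks/flushB/stepB pipeline
theorem A_eq_pipeline (sentences : List String) (hl : Int) :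
    create_slides sentences hl
      = renderChunks (flushB (sentences.foldl (stepB hl) ([], []))) := by
  unfold create_slides
  cases sentences with
  | nil => rfl
  | cons s rest =>
      exact main_inv (s :: rest) hl (s :: rest) [] [] [] "" 0 (by simp)
        (by simp) (by simp) (by simp) (by simp [renderChunks, PySem.List.enumerate]) (by simp)

-- the stepB pipeline produces the five-element groups, each mapped through lineF
theorem pipeline_eq_groups (hl : Int) :
    ∀ (n : Nat) (l : List String), l.length ≤ n → ∀ (chunks : List (List String)),
      flushB (l.foldl (stepB hl) (chunks, []))
        = chunks ++ (groups l).map (List.map (lineF hl)) := by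
  intro n
  induction n with
  | zero =>
    intro l hlen chunks
    have : l = [] := List.length_eq_zero_iff.mp (Nat.le_zero.mp hlen)
    subst this
    simp [flushB, groups_nil]
  | succ n ih =>
    intro l hlen chunks
    match l with
    | [] => simp [flushB, groups_nil]
    | [a] => simp [stepB, flushB, groups_cons, groups_nil]
    | [a,b] => simp [stepB, flushB, groups_cons, groups_nil]
    | [a,b,c] => simp [stepB, flushB, groups_cons, groups_nil]
    | [a,b,c,d] => simp [stepB, flushB, groups_cons, groups_nil]
    | a :: b :: c :: d :: e :: t =>
      have h5 : ((a :: b :: c :: d :: e :: t).foldl (stepB hl) (chunks, []))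
          = t.foldl (stepB hl) (chunks ++ [[lineF hl a, lineF hl b, lineF hl c, lineF hl d, lineF hl e]], []) := by
        simp only [List.foldl_cons]
        norm_num [stepB]
      rw [h5, ih t (by simp at hlen ⊢; omega)]
      have hg : groups (a :: b :: c :: d :: e :: t)
          = [a,b,c,d,e] :: groups t := by
        rw [groups_cons]; rfl
      rw [hg]
      simp [lineF]

-- a cons lemma for range(a, b, 5)
theorem pyRange5_nil (a b : Int) (h : b ≤ a) : PySem.List.pyRange a b 5 = [] := by
  rw [PySem.List.pyRange_of_pos _ _ (by norm_num : (0:Int) < 5), if_neg (by omega)]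
  simp

theorem pyRange5_cons (a b : Int) (h : a < b) :
    PySem.List.pyRange a b 5 = a :: PySem.List.pyRange (a+5) b 5 := by
  rw [PySem.List.pyRange_of_pos _ _ (by norm_num : (0:Int) < 5),
      PySem.List.pyRange_of_pos _ _ (by norm_num : (0:Int) < 5), if_pos h]
  by_cases h2 : a + 5 < b
  · rw [if_pos h2]
    have hc : ((b - a + 5 - 1) / 5).toNat = ((b - (a+5) + 5 - 1) / 5).toNat + 1 := by omega
    rw [hc, List.range_succ_eq_map]
    simp only [List.map_cons, List.map_map]
    congr 1
    · norm_num
    · apply List.map_congr_left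
      intro k _
      simp only [Function.comp]
      push_cast; ring
  · rw [if_neg h2]
    have hc : ((b - a + 5 - 1) / 5).toNat = 1 := by omega
    rw [hc]
    simp

-- B's strided fold, from any positive start j, renders the groups of the corresponding suffix,
-- each slide prefixed with the separator
theorem B_tail (sentences : List String) (hl : Int) :
    ∀ (m j : Nat) (acc : List String), (sentences.drop j).length ≤ m → 0 < j →
      (PySem.List.pyRange (j : Int) (sentences.length : Int) 5).foldl
          (stepBAlt sentences (String.ofList (PySem.List.pyRepeat ['+'] hl) ++ " ")) acc
        = acc ++ (groups (sentences.drop j)).map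
            (fun c => "\n---\n" ++ PySem.Str.join "" (c.map (lineF hl))) := by
  intro m
  induction m with
  | zero =>
    intro j acc hlen _
    have hnil : sentences.drop j = [] := List.length_eq_zero_iff.mp (Nat.le_zero.mp hlen)
    have hj : (sentences.length : Int) ≤ (j : Int) := by
      have := List.drop_eq_nil_iff.mp hnil; exact_mod_cast this
    rw [pyRange5_nil _ _ hj, hnil]
    simp [groups_nil]
  | succ m ih =>
    intro j acc hlen hj
    by_cases hend : sentences.drop j = []
    · have hjn : (sentences.length : Int) ≤ (j : Int) := by
        have := List.drop_eq_nil_iff.mp hend; exact_mod_cast this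
      rw [pyRange5_nil _ _ hjn, hend]
      simp [groups]
    · have hjn : (j : Int) < (sentences.length : Int) := by
        have hlt : j < sentences.length := by
          by_contra hge
          exact hend (List.drop_eq_nil_iff.mpr (by omega))
        exact_mod_cast hlt
      rw [pyRange5_cons _ _ hjn]
      rw [List.foldl_cons]
      have hstep : stepBAlt sentences (String.ofList (PySem.List.pyRepeat ['+'] hl) ++ " ") acc (j : Int)
          = acc ++ ["\n---\n" ++ PySem.Str.join "" (((sentences.drop j).take 5).map (lineF hl))] := by
        simp only [stepBAlt]
        have hne : ¬((((j:Nat):Int) == 0) = true) := by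
          simp only [beq_iff_eq]
          exact_mod_cast Nat.pos_iff_ne_zero.mp hj
        rw [if_neg hne, show ((j:Int) + 5) = ((j:Int) + ((5:Nat):Int)) by norm_num,
            PySem.List.slice_natCast_add]
        rfl
      rw [hstep]
      have hcast : ((j:Int) + 5) = (((j+5 : Nat)):Int) := by push_cast; ring
      rw [hcast, ih (j+5) _ (by
            have h1 : 1 ≤ (sentences.drop j).length := List.length_pos_of_ne_nil hend
            simp only [List.length_drop] at *
            omega) (by omega)]
      have hg : groups (sentences.drop j)
          = (sentences.drop j).take 5 :: groups ((sentences.drop j).drop 5) := by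
        obtain ⟨x, xs, hc⟩ : ∃ x xs, sentences.drop j = x :: xs := by
          cases hc : sentences.drop j with
          | nil => exact absurd hc hend
          | cons x xs => exact ⟨x, xs, rfl⟩
        rw [hc, groups_cons]
      rw [List.drop_drop] at hg
      rw [hg]
      simp

-- ===== VERDICT (by name: the statement is the Claim_ definition above) =====
theorem create_slides_spec : Claim_equal_create_slides := by
  intro sentences hl _
  unfold Spec_create_slides
  rw [A_eq_pipeline,
      pipeline_eq_groups hl sentences.length sentences (le_refl _) [], List.nil_append]
  unfold create_slides_alt
  cases hs : sentences with
  | nil => simp [groups_nil, renderChunks, PySem.List.enumerate_nil, PySem.List.pyRange]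
  | cons s rest =>
    rw [← hs]
    have hpos : (0:Int) < (sentences.length : Int) := by
      rw [hs]; exact_mod_cast Nat.succ_pos rest.length
    rw [pyRange5_cons _ _ hpos, List.foldl_cons]
    have hstep0 : stepBAlt sentences (String.ofList (PySem.List.pyRepeat ['+'] hl) ++ " ") [] (0 : Int)
        = [PySem.Str.join "" ((sentences.take 5).map (lineF hl))] := by
      simp only [stepBAlt]
      rw [if_pos (show (((0:Int)) == 0) = true by rfl)]
      rw [show ((0:Int) + 5) = (((0:Nat):Int) + ((5:Nat):Int)) by norm_num,
          show (0:Int) = ((0:Nat):Int) by norm_num,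
          PySem.List.slice_natCast_add]
      rfl
    rw [hstep0,
        show ((0:Int)+5) = (((5:Nat)):Int) by norm_num,
        B_tail sentences hl sentences.length 5 _ (by simp) (by omega)]
    have hg : groups sentences = sentences.take 5 :: groups (sentences.drop 5) := by
      rw [hs, groups_cons, ← hs]
    rw [hg, List.map_cons, renderChunks_cons, List.map_map]
    simp
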